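-- pv_equiv track=rewrite | github.com/pisterlabs/promptset | data/scraping/repos/davidwaldherr~UniversalSummarier/1_Universal.py | findChapters
-- ===== SOURCE A (Python) =====
-- def findChapters(text, contents, table):
--     for i in range(len(table)):
--         if table[i] == '1':
--             for j in range(len(contents)):
--                 if contents[j] == text[i]:
--                     table[i] = '3'
--                     break
--     return table
-- ===== SOURCE B (Python) =====
-- def findChapters(text, contents, table):
--     # index-then-sweep: group the '1' positions by their text value, then one pass over contents
--     if not contents:
--         return table
--     positions = {}
--     for i in range(len(table)):
--         if table[i] == '1':
--             positions.setdefault(text[i], []).append(i)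
--     for c in contents:
--         if c in positions:
--             for idx in positions[c]:
--                 table[idx] = '3'
--     return table
-- ===== Notes on version B (the rewrite author's own statement) =====
-- stated objective: alternative
-- what changed: Instead of rescanning contents for every '1' entry, B builds one dict from each text value to its list of '1' positions and then makes a single sweep over contents marking all matching positions.
import Mathlib
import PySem

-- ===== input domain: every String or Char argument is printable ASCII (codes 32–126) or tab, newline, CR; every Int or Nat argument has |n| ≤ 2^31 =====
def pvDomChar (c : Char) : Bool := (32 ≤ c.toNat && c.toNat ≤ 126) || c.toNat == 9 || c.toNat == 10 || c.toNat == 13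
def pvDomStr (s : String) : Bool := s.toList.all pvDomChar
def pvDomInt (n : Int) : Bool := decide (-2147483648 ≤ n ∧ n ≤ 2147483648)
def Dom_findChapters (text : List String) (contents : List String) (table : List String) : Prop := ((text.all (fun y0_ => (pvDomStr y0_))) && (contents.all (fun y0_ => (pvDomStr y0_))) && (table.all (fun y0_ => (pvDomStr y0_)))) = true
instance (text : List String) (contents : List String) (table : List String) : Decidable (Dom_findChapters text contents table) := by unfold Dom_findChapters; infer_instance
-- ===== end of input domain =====

-- B replaces A's per-entry rescans of contents by a dict from each text value to its list of '1'
-- positions plus one sweep over contents; like A it mutates `table` in place in Python — the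
-- equivalence proved here is about the returned value (the same mutated list in both).


-- ===== PORT A =====
def findChapters (text : List String) (contents : List String) (table : List String) : List String :=
  (PySem.List.pyRange 0 (table.length : Int) 1).foldl
    (fun tbl i =>
      if PySem.List.pyGetD tbl i "" == "1" then
        if contents.any (fun c => c == PySem.List.pyGetD text i "") then
          PySem.List.pySetD tbl i "3"
        else tbl
      else tbl) table

-- ===== PORT B =====
def findChapters_alt (text : List String) (contents : List String) (table : List String) : List String :=
  if contents = [] then table
  else
    let d : PySem.Dict String (List Int) :=
      (PySem.List.pyRange 0 (table.length : Int) 1).foldl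
        (fun d i =>
          if PySem.List.pyGetD table i "" == "1" then
            d.insert (PySem.List.pyGetD text i "")
              (d.getD (PySem.List.pyGetD text i "") [] ++ [i])
          else d) PySem.Dict.empty
    contents.foldl
      (fun tbl c =>
        match d.get? c with
        | some idxs => idxs.foldl (fun t idx => PySem.List.pySetD t idx "3") tbl
        | none => tbl) table


-- ===== PRECONDITION & SPEC =====
-- Pre_ excludes exactly the inputs on which Python A raises IndexError: contents nonempty and some
-- index i with table[i] == '1' and i >= len(text) (Python B raises the same IndexError there).
def Pre_findChapters (text : List String) (contents : List String) (table : List String) : Prop :=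
  contents ≠ [] → ∀ i : Nat, i < table.length → table.getD i "" = "1" → i < text.length
instance (text : List String) (contents : List String) (table : List String) : Decidable (Pre_findChapters text contents table) := by unfold Pre_findChapters; infer_instance

def pvWitness_findChapters : List String × List String × List String :=
  (["a", "b"], ["b", "x"], ["1", "1", "0"])

def Spec_findChapters (text : List String) (contents : List String) (table : List String) (out : List String) : Prop := out = findChapters_alt text contents table
instance (text : List String) (contents : List String) (table : List String) (out : List String) : Decidable (Spec_findChapters text contents table out) := by unfold Spec_findChapters; infer_instance

-- ===== CLAIM (what is proved, stated in full; the proofs are below) =====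
def Claim_equal_findChapters : Prop := ∀ (text : List String) (contents : List String) (table : List String), Dom_findChapters text contents table → Pre_findChapters text contents table → Spec_findChapters text contents table (findChapters text contents table)

-- ===== LEMMAS AND PROOFS =====

def pvMarked (text : List String) (cs : List String) (table : List String) : List String :=
  table.mapIdx (fun i s => if s = "1" ∧ text.getD i "" ∈ cs then "3" else s)

def pvStepA (text contents : List String) (tbl : List String) (i : Nat) : List String :=
  if tbl.getD i "" = "1" ∧ text.getD i "" ∈ contents then tbl.set i "3" else tbl

lemma A_marked (text contents table : List String) : ∀ k : Nat,
    (List.range k).foldl (pvStepA text contents) table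
      = table.mapIdx (fun i s => if i < k ∧ s = "1" ∧ text.getD i "" ∈ contents then "3" else s) := by
  intro k
  induction k with
  | zero =>
    simp only [List.range_zero, List.foldl_nil, Nat.not_lt_zero, false_and, if_false]
    apply List.ext_getElem? ; intro i ; simp [List.getElem?_mapIdx]
  | succ k ih =>
    rw [List.range_succ, List.foldl_append, List.foldl_cons, List.foldl_nil, ih, pvStepA]
    have hget : (table.mapIdx fun i s => if i < k ∧ s = "1" ∧ text.getD i "" ∈ contents then "3" else s).getD k ""
        = table.getD k "" := by
      rcases Nat.lt_or_ge k table.length with h | h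
      · simp [List.getD, h]
      · simp [List.getD, h, List.getElem?_eq_none_iff.2 (by simpa using h)]
    rw [hget]
    split_ifs with hc
    · simp only [List.getD] at hc
      apply List.ext_getElem? ; intro i
      simp only [List.getElem?_set, List.getElem?_mapIdx, List.length_mapIdx]
      by_cases hi : i < table.length
      · by_cases hik : k = i
        · subst hik
          simp only [List.getElem?_eq_getElem hi] at hc
          simp [hi]
          intro h
          exact absurd hc.2 (h hc.1)
        · have hik' : ¬ i = k := fun h => hik h.symm
          simp only [hik, if_false]
          simp [hi, Option.map]
          by_cases h1 : i < k
          · simp [h1, Nat.le_of_lt h1]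
          · have h2 : ¬ i ≤ k := by omega
            simp [h1, h2]
      · have hn : table[i]? = none := List.getElem?_eq_none_iff.2 (by simpa using hi)
        have hkn : ¬ k = i := by intro h; subst h; simp [hn] at hc
        simp [hn, hkn]
    · simp only [List.getD] at hc
      apply List.ext_getElem? ; intro i
      simp only [List.getElem?_mapIdx]
      by_cases hi : i < table.length
      · simp [hi, Option.map]
        by_cases h1 : i < k
        · simp [h1, Nat.le_of_lt h1]
        · by_cases h2 : i ≤ k
          · have hik : i = k := by omega
            subst hik
            simp only [List.getElem?_eq_getElem hi] at hc
            simp [h1, h2]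
            intro ha hb
            exact absurd ⟨ha, hb⟩ hc
          · simp [h1, h2]
      · simp [List.getElem?_eq_none_iff.2 (by simpa using hi)]

-- ===== B side =====
def pvBuild (text table : List String) : PySem.Dict String (List Int) :=
  (List.range table.length).foldl
    (fun d i =>
      if table.getD i "" = "1" then
        d.insert (text.getD i "") (d.getD (text.getD i "") [] ++ [(i : Int)])
      else d)
    PySem.Dict.empty

def pvStepC (text table : List String) (tbl : List String) (c : String) : List String :=
  match (pvBuild text table).get? c with
  | some idxs => idxs.foldl (fun t idx => PySem.List.pySetD t idx "3") tbl
  | none => tbl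

def pvIdxsN (text table : List String) (s : String) (k : Nat) : List Nat :=
  (List.range k).filter (fun i => table.getD i "" == "1" && text.getD i "" == s)

lemma build_get? (text table : List String) (s : String) : ∀ k : Nat,
    ((List.range k).foldl
      (fun d i =>
        if table.getD i "" = "1" then
          d.insert (text.getD i "") (d.getD (text.getD i "") [] ++ [(i : Int)])
        else d)
      (PySem.Dict.empty : PySem.Dict String (List Int))).get? s
    = if pvIdxsN text table s k = [] then none
      else some ((pvIdxsN text table s k).map (fun (i : Nat) => (i : Int))) := by
  intro k
  induction k with
  | zero => simp [pvIdxsN, PySem.Dict.get?_empty]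
  | succ k ih =>
    rw [List.range_succ, List.foldl_append, List.foldl_cons, List.foldl_nil]
    have hidx : pvIdxsN text table s (k+1)
        = pvIdxsN text table s k
          ++ (if table.getD k "" == "1" && text.getD k "" == s then [k] else []) := by
      simp only [pvIdxsN, List.range_succ, List.filter_append, List.filter_cons,
        List.filter_nil]
    by_cases h1 : table.getD k "" = "1"
    · simp only [h1, if_true]
      by_cases h2 : s = text.getD k ""
      · have ih' := ih
        rw [h2] at ih'
        rw [h2, PySem.Dict.get?_insert_self]
        have hD : (((List.range k).foldl
            (fun d i =>
              if table.getD i "" = "1" then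
                d.insert (text.getD i "") (d.getD (text.getD i "") [] ++ [(i : Int)])
              else d)
            (PySem.Dict.empty : PySem.Dict String (List Int)))).getD (text.getD k "") []
            = (pvIdxsN text table (text.getD k "") k).map (fun (i : Nat) => (i : Int)) := by
          rw [PySem.Dict.getD_eq_get?_getD, ih']
          split_ifs with h
          · simp only [List.getD] at h ⊢
            simp [h]
          · simp
        rw [hD]
        have hstep : pvIdxsN text table (text.getD k "") (k+1)
            = pvIdxsN text table (text.getD k "") k ++ [k] := by
          have hidx' : pvIdxsN text table (text.getD k "") (k+1)
              = pvIdxsN text table (text.getD k "") k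
                ++ (if table.getD k "" == "1" && text.getD k "" == text.getD k "" then [k] else []) := by
            simp only [pvIdxsN, List.range_succ, List.filter_append, List.filter_cons,
              List.filter_nil]
          rw [hidx', h1]
          simp
        rw [hstep]
        simp
      · rw [PySem.Dict.get?_insert_of_ne _ _ h2, ih]
        have hne : text.getD k "" ≠ s := fun h => h2 h.symm
        have hstep : pvIdxsN text table s (k+1) = pvIdxsN text table s k := by
          rw [hidx]
          have : (table.getD k "" == "1" && text.getD k "" == s) = false := by
            simp only [List.getD] at hne ⊢
            simp [hne]
          rw [this]; simp
        rw [hstep]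
    · simp only [h1, if_false]
      rw [ih]
      have hstep : pvIdxsN text table s (k+1) = pvIdxsN text table s k := by
        rw [hidx]
        have : (table.getD k "" == "1" && text.getD k "" == s) = false := by
          simp only [List.getD] at h1 ⊢
          simp [h1]
        rw [this]; simp
      rw [hstep]

def pvSet (js : List Nat) (t0 : List String) : List String :=
  js.foldl (fun t j => t.set j "3") t0

lemma pvSet_getElem? (js : List Nat) : ∀ (t0 : List String) (i : Nat),
    (pvSet js t0)[i]? = if i ∈ js then (if i < t0.length then some "3" else none) else t0[i]? := by
  induction js with
  | nil => intro t0 i; simp [pvSet]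
  | cons j js ih =>
    intro t0 i
    have : pvSet (j :: js) t0 = pvSet js (t0.set j "3") := rfl
    rw [this, ih]
    simp only [List.length_set, List.getElem?_set, List.mem_cons]
    by_cases h1 : i ∈ js
    · simp [h1]
    · by_cases h2 : j = i
      · subst h2; simp [h1]
      · have : ¬ i = j := fun h => h2 h.symm
        simp [h1, h2, this]

lemma marked_nil (text table : List String) : pvMarked text [] table = table := by
  apply List.ext_getElem? ; intro i
  simp [pvMarked, List.getElem?_mapIdx, Option.map_id']

lemma stepC_marked (text table as : List String) (c : String) :
    pvStepC text table (pvMarked text as table) c = pvMarked text (as ++ [c]) table := by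
  have hmem : ∀ i : Nat, i ∈ pvIdxsN text table c table.length
      ↔ i < table.length ∧ table.getD i "" = "1" ∧ text.getD i "" = c := by
    intro i
    simp [pvIdxsN, List.mem_filter, List.mem_range, and_assoc]
  by_cases hE : pvIdxsN text table c table.length = []
  · -- key absent: no index matches c
    have h0 : (pvBuild text table).get? c = none := by
      rw [pvBuild, build_get?, if_pos hE]
    rw [pvStepC, h0]
    have hno : ∀ i : Nat, i < table.length → ¬(table.getD i "" = "1" ∧ text.getD i "" = c) := by
      intro i hi hcond
      have : i ∈ pvIdxsN text table c table.length := (hmem i).2 ⟨hi, hcond⟩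
      simp [hE] at this
    apply List.ext_getElem? ; intro i
    simp only [pvMarked, List.getElem?_mapIdx]
    rcases h : table[i]? with _ | v
    · simp
    · have hi : i < table.length := List.getElem?_eq_some_iff.mp h |>.1
      have hv : table[i] = v := by
        have := List.getElem?_eq_some_iff.mp h |>.2; exact this
      simp only [Option.map_some]
      by_cases hc1 : v = "1"
      · by_cases hc2 : text.getD i "" = c
        · exact absurd ⟨by rw [List.getD_eq_getElem _ _ hi, hv]; exact hc1, hc2⟩ (hno i hi)
        · simp only [List.getD] at hc2
          simp [hc1, hc2]
      · simp [hc1]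
  · -- key present: set every matching index to "3"
    have h0 : (pvBuild text table).get? c
        = some ((pvIdxsN text table c table.length).map (fun (i : Nat) => (i : Int))) := by
      rw [pvBuild, build_get?]
      simp [hE]
    rw [pvStepC, h0]
    dsimp only
    rw [List.foldl_map]
    have hfold : List.foldl (fun t (j : Nat) => PySem.List.pySetD t (j : Int) "3")
        (pvMarked text as table) (pvIdxsN text table c table.length)
        = pvSet (pvIdxsN text table c table.length) (pvMarked text as table) := by
      apply PySem.List.foldl_congr_mem
      intro t j _
      simp
    rw [hfold]
    apply List.ext_getElem? ; intro i
    rw [pvSet_getElem?]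
    have hlen : (pvMarked text as table).length = table.length := by simp [pvMarked]
    by_cases hj : i ∈ pvIdxsN text table c table.length
    · rcases (hmem i).1 hj with ⟨hi, hc1, hc2⟩
      simp only [hj, if_true, hlen, hi, if_true]
      have hv : table[i]? = some table[i] := List.getElem?_eq_getElem hi
      simp only [pvMarked, List.getElem?_mapIdx, hv, Option.map_some]
      have h1 : table[i] = "1" := by rwa [List.getD_eq_getElem _ _ hi] at hc1
      simp only [List.getD] at hc2
      simp [h1, hc2]
    · simp only [hj, if_false]
      simp only [pvMarked, List.getElem?_mapIdx]
      rcases h : table[i]? with _ | v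
      · simp
      · have hi : i < table.length := List.getElem?_eq_some_iff.mp h |>.1
        have hv : table[i] = v := List.getElem?_eq_some_iff.mp h |>.2
        have hnc : ¬(table.getD i "" = "1" ∧ text.getD i "" = c) := by
          intro hcond; exact hj ((hmem i).2 ⟨hi, hcond⟩)
        simp only [Option.map_some]
        by_cases hc1 : v = "1"
        · have hc2 : ¬ text.getD i "" = c := by
            intro hc2; exact hnc ⟨by rw [List.getD_eq_getElem _ _ hi, hv]; exact hc1, hc2⟩
          simp only [List.getD] at hc2
          simp [hc1, hc2]
        · simp [hc1]

lemma pass2 (text table : List String) : ∀ (cs as : List String),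
    cs.foldl (pvStepC text table) (pvMarked text as table) = pvMarked text (as ++ cs) table := by
  intro cs
  induction cs with
  | nil => intro as; simp
  | cons c cs ih =>
    intro as
    rw [List.foldl_cons, stepC_marked, ih]
    simp

lemma A_norm (text contents table : List String) :
    findChapters text contents table
      = (List.range table.length).foldl (pvStepA text contents) table := by
  rw [findChapters, PySem.List.pyRange_one]
  simp only [Int.sub_zero, Int.toNat_natCast, List.foldl_map]
  apply PySem.List.foldl_congr_mem
  intro tbl k _
  simp only [zero_add, PySem.List.pyGetD_natCast, PySem.List.pySetD_natCast, pvStepA]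
  by_cases h1 : tbl.getD k "" = "1"
  · by_cases h2 : text.getD k "" ∈ contents
    · have ha : contents.any (fun c => c == text.getD k "") = true := by
        rw [List.any_eq_true]
        exact ⟨_, h2, by simp⟩
      simp only [List.getD] at h1 h2
      simp [h1, h2, ha]
    · have ha : contents.any (fun c => c == text.getD k "") = false := by
        rw [List.any_eq_false]
        intro c hc
        simp only [beq_iff_eq]
        intro he; exact h2 (he ▸ hc)
      simp only [List.getD] at h1 h2
      simp [h1, h2, ha]
  · simp only [List.getD] at h1
    simp [h1]

lemma B_norm (text contents table : List String) (hc : contents ≠ []) :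
    findChapters_alt text contents table
      = contents.foldl (pvStepC text table) table := by
  rw [findChapters_alt, if_neg hc]
  have hbuild : (PySem.List.pyRange 0 (table.length : Int) 1).foldl
      (fun d i =>
        if PySem.List.pyGetD table i "" == "1" then
          d.insert (PySem.List.pyGetD text i "")
            (d.getD (PySem.List.pyGetD text i "") [] ++ [i])
        else d) (PySem.Dict.empty : PySem.Dict String (List Int))
      = pvBuild text table := by
    rw [pvBuild, PySem.List.pyRange_one]
    simp only [Int.sub_zero, Int.toNat_natCast, List.foldl_map]
    apply PySem.List.foldl_congr_mem
    intro d k _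
    simp only [zero_add, PySem.List.pyGetD_natCast]
    by_cases h1 : table.getD k "" = "1"
    · simp only [List.getD] at h1
      simp [h1]
    · simp only [List.getD] at h1
      simp [h1]
  simp only [hbuild]
  apply PySem.List.foldl_congr_mem
  intro tbl c _
  rfl

lemma A_eq_marked (text contents table : List String) :
    findChapters text contents table = pvMarked text contents table := by
  rw [A_norm, A_marked]
  apply List.ext_getElem? ; intro i
  simp only [pvMarked, List.getElem?_mapIdx]
  rcases h : table[i]? with _ | v
  · simp
  · have hi : i < table.length := List.getElem?_eq_some_iff.mp h |>.1
    simp [hi]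

lemma AB (text contents table : List String) :
    findChapters text contents table = findChapters_alt text contents table := by
  by_cases hc : contents = []
  · subst hc
    rw [findChapters_alt, if_pos rfl, A_eq_marked, marked_nil]
  · rw [A_eq_marked, B_norm text contents table hc]
    have h0 : table = pvMarked text [] table := (marked_nil text table).symm
    conv_lhs => rw [show contents = [] ++ contents from rfl]
    rw [← pass2 text table contents []]
    rw [← h0]

-- ===== VERDICT (by name: the statement is the Claim_ definition above) =====
theorem findChapters_spec : Claim_equal_findChapters := by
  intro text contents table _ _
  exact AB text contents table
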